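-- pv_equiv track=rewrite | github.com/loganriggs/toy_models_of_tensor_networks | attn_circuits/verify_fast_generator.py | count_rule_classes
-- ===== SOURCE A (Python) =====
-- from collections import Counter
--
-- def count_rule_classes(all_labels):
--     """Count rule class frequencies (bigram, trigram, skip_bigram, etc.)."""
--     c = Counter()
--     for seq in all_labels:
--         for lab in seq:
--             if lab.startswith('bigram'):
--                 c['bigram'] += 1
--             elif lab.startswith('trigram'):
--                 c['trigram'] += 1
--             elif lab.startswith('skip'):
--                 c['skip_bigram'] += 1
--             elif lab.startswith('induction'):
--                 c['induction'] += 1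
--             elif lab.startswith('bracket'):
--                 c['bracket'] += 1
--             elif lab == 'setup':
--                 c['setup'] += 1
--             elif lab == 'noise' or lab == 'noise_seed':
--                 c['noise'] += 1
--             else:
--                 c['other'] += 1
--     return c
-- ===== SOURCE B (Python) =====
-- from collections import Counter
--
-- def _classify(lab):
--     if lab.startswith('bigram'):
--         return 'bigram'
--     elif lab.startswith('trigram'):
--         return 'trigram'
--     elif lab.startswith('skip'):
--         return 'skip_bigram'
--     elif lab.startswith('induction'):
--         return 'induction'
--     elif lab.startswith('bracket'):
--         return 'bracket'
--     elif lab == 'setup':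
--         return 'setup'
--     elif lab == 'noise' or lab == 'noise_seed':
--         return 'noise'
--     else:
--         return 'other'
--
-- def count_rule_classes(all_labels):
--     """Count rule class frequencies: count distinct labels once, then aggregate."""
--     freq = Counter(lab for seq in all_labels for lab in seq)
--     result = Counter()
--     for lab, n in freq.items():
--         result[_classify(lab)] += n
--     return result
-- ===== Notes on version B (the rewrite author's own statement) =====
-- stated objective: alternative
-- what changed: B first builds a Counter of distinct labels (one frequency index over the flattened input), then classifies each distinct label exactly once and adds its whole count, instead of re-running the prefix/exact-match chain on every occurrence.
import Mathlib
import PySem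

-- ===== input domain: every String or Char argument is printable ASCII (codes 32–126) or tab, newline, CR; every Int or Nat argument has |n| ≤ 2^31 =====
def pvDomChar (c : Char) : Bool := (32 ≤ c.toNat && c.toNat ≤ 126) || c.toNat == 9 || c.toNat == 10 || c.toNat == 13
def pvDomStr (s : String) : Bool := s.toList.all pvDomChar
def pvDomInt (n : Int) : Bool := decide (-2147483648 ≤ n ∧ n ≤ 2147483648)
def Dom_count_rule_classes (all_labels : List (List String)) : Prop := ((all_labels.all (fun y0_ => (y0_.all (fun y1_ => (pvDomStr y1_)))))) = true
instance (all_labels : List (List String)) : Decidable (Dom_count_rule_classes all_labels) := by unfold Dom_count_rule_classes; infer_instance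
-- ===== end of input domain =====

-- B replaces A's per-occurrence classification loop by a two-pass scheme (frequency Counter over the
-- flattened labels, then one classification per distinct label aggregated by its count): alternative decomposition, same results.

-- ===== PORT A =====
def count_rule_classes (all_labels : List (List String)) : List (String × Int) :=
  (all_labels.foldl (fun c seq =>
      seq.foldl (fun c lab =>
        if PySem.Str.startswith lab "bigram" then c.modify "bigram" 0 (· + 1)
        else if PySem.Str.startswith lab "trigram" then c.modify "trigram" 0 (· + 1)
        else if PySem.Str.startswith lab "skip" then c.modify "skip_bigram" 0 (· + 1)
        else if PySem.Str.startswith lab "induction" then c.modify "induction" 0 (· + 1)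
        else if PySem.Str.startswith lab "bracket" then c.modify "bracket" 0 (· + 1)
        else if lab == "setup" then c.modify "setup" 0 (· + 1)
        else if lab == "noise" || lab == "noise_seed" then c.modify "noise" 0 (· + 1)
        else c.modify "other" 0 (· + 1)) c)
    (PySem.Dict.empty : PySem.Dict String Int)).items

-- ===== PORT B =====
def pvClassify (lab : String) : String :=
  if PySem.Str.startswith lab "bigram" then "bigram"
  else if PySem.Str.startswith lab "trigram" then "trigram"
  else if PySem.Str.startswith lab "skip" then "skip_bigram"
  else if PySem.Str.startswith lab "induction" then "induction"
  else if PySem.Str.startswith lab "bracket" then "bracket"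
  else if lab == "setup" then "setup"
  else if lab == "noise" || lab == "noise_seed" then "noise"
  else "other"

def count_rule_classes_alt (all_labels : List (List String)) : List (String × Int) :=
  let freq := PySem.Dict.counter all_labels.flatten
  (freq.items.foldl (fun r p => r.modify (pvClassify p.1) 0 (fun t => t + p.2))
    (PySem.Dict.empty : PySem.Dict String Int)).items

-- ===== PRECONDITION & SPEC =====
def Spec_count_rule_classes (all_labels : List (List String)) (out : List (String × Int)) : Prop := out = count_rule_classes_alt all_labels
instance (all_labels : List (List String)) (out : List (String × Int)) : Decidable (Spec_count_rule_classes all_labels out) := by unfold Spec_count_rule_classes; infer_instance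

-- ===== CLAIM (what is proved, stated in full; the proofs are below) =====
def Claim_equal_count_rule_classes : Prop := ∀ (all_labels : List (List String)), Dom_count_rule_classes all_labels → Spec_count_rule_classes all_labels (count_rule_classes all_labels)

-- ===== LEMMAS AND PROOFS =====

-- A's eight-way increment chain is exactly one modify at the classified key.
lemma pvStepA_eq (c : PySem.Dict String Int) (lab : String) :
    (if PySem.Str.startswith lab "bigram" then c.modify "bigram" 0 (· + 1)
     else if PySem.Str.startswith lab "trigram" then c.modify "trigram" 0 (· + 1)
     else if PySem.Str.startswith lab "skip" then c.modify "skip_bigram" 0 (· + 1)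
     else if PySem.Str.startswith lab "induction" then c.modify "induction" 0 (· + 1)
     else if PySem.Str.startswith lab "bracket" then c.modify "bracket" 0 (· + 1)
     else if lab == "setup" then c.modify "setup" 0 (· + 1)
     else if lab == "noise" || lab == "noise_seed" then c.modify "noise" 0 (· + 1)
     else c.modify "other" 0 (· + 1))
    = c.modify (pvClassify lab) 0 (· + 1) := by
  unfold pvClassify; split_ifs <;> rfl

-- getD of a keyed modify-accumulate loop.
lemma pvGetD_foldl_modify_keyed (l : List String) (key : String → String) (n : String → Int)
    (v : String) : ∀ d : PySem.Dict String Int,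
    (l.foldl (fun r k => r.modify (key k) 0 (fun t => t + n k)) d).getD v 0
      = d.getD v 0 + ((l.filter (fun k => key k == v)).map n).sum := by
  induction l with
  | nil => intro d; simp
  | cons x l ih =>
    intro d
    simp only [List.foldl_cons]
    by_cases h : key x = v
    · rw [List.filter_cons_of_pos (by simp [h])]
      simp only [List.map_cons, List.sum_cons]
      rw [ih, ← h, PySem.Dict.getD_modify_self]
      ring_nf
    · rw [List.filter_cons_of_neg (by simp [h])]
      rw [ih, PySem.Dict.getD_modify_of_ne _ _ _ (fun hv => h hv.symm)]

-- sum of a membership indicator over a Nodup list.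
lemma pvSum_indicator (l : List String) (hl : l.Nodup) (x : String) :
    (l.map (fun k => if x == k then (1 : Int) else 0)).sum = if x ∈ l then 1 else 0 := by
  induction l with
  | nil => simp
  | cons a l ih =>
    rcases List.nodup_cons.mp hl with ⟨ha, hl'⟩
    simp only [List.map_cons, List.sum_cons]
    by_cases h : x = a
    · subst h
      have hz : (List.map (fun k => if x == k then (1 : Int) else 0) l).sum = 0 := by
        apply List.sum_eq_zero
        intro y hy
        obtain ⟨k, hk, rfl⟩ := List.mem_map.mp hy
        have hne : x ≠ k := fun he => ha (he ▸ hk)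
        simp [hne]
      rw [hz]
      simp
    · have hb : (x == a) = false := by simp [h]
      rw [hb, ih hl']
      simp [List.mem_cons, h]

-- grouping occurrences by distinct label: summing per-label counts over the distinct labels of a class
-- equals counting that class over all occurrences.
lemma pvSum_counts (ds : List String) (hnd : ds.Nodup) (f : String → String) (v : String) :
    ∀ xs : List String, (∀ x ∈ xs, x ∈ ds) →
      ((ds.filter (fun k => f k == v)).map (fun k => (xs.count k : Int))).sum
        = ((xs.map f).count v : Int) := by
  intro xs
  induction xs with
  | nil => intro _; simp
  | cons x xs ih =>
    intro hsub
    have hx : x ∈ ds := hsub x List.mem_cons_self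
    have hcount : (fun k => ((x :: xs).count k : Int))
        = fun k => (xs.count k : Int) + (if x == k then (1 : Int) else 0) := by
      funext k
      rw [List.count_cons]
      split_ifs with h <;> simp
    rw [hcount, PySem.List.sum_map_add_int,
        pvSum_indicator _ (hnd.filter _) x,
        ih (fun y hy => hsub y (List.mem_cons_of_mem _ hy))]
    have hmem : x ∈ ds.filter (fun k => f k == v) ↔ (f x == v) = true := by
      simp [List.mem_filter, hx]
    by_cases hfx : f x = v
    · have : x ∈ ds.filter (fun k => f k == v) := hmem.mpr (by simp [hfx])
      simp [this, hfx]
    · have : x ∉ ds.filter (fun k => f k == v) := fun hm => hfx (by simpa using hmem.mp hm)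
      simp [this, hfx]

-- first-occurrence dedup commutes with mapping before dedup.
lemma pvOfList_map_ofList (f : String → String) (xs : List String) :
    PySem.Set.ofList (List.map f (PySem.Set.ofList xs)) = PySem.Set.ofList (List.map f xs) := by
  induction xs using List.reverseRecOn with
  | nil => rfl
  | append_singleton xs x ih =>
    have hsnoc : ∀ (ys : List String), PySem.Set.ofList (ys ++ [x]) = (PySem.Set.ofList ys).add x := by
      intro ys
      rw [PySem.Set.ofList_append, PySem.Set.update_cons, PySem.Set.update_nil]
    have hsnocf : PySem.Set.ofList (List.map f (xs ++ [x]))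
        = (PySem.Set.ofList (List.map f xs)).add (f x) := by
      rw [List.map_append, List.map_singleton, PySem.Set.ofList_append,
          PySem.Set.update_cons, PySem.Set.update_nil]
    rw [hsnoc xs, hsnocf, ← ih]
    by_cases hx : x ∈ PySem.Set.ofList xs
    · -- x already present: dedup unchanged, and f x is already in the mapped dedup
      have h1 : (PySem.Set.ofList xs).add x = PySem.Set.ofList xs := by
        simp [PySem.Set.add, hx]
      have h2 : f x ∈ PySem.Set.ofList (List.map f (PySem.Set.ofList xs)) := by
        rw [PySem.Set.mem_ofList]
        exact List.mem_map_of_mem hx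
      rw [h1]
      simp [PySem.Set.add, h2]
    · have h1 : (PySem.Set.ofList xs).add x = PySem.Set.ofList xs ++ [x] := by
        simp [PySem.Set.add, hx]
      rw [h1, List.map_append, List.map_singleton, PySem.Set.ofList_append,
          PySem.Set.update_cons, PySem.Set.update_nil]

-- the aggregation over distinct labels IS the counter of the classified occurrence stream.
lemma pvAgg_eq_counter (xs : List String) :
    (PySem.Set.ofList xs).foldl
        (fun r k => r.modify (pvClassify k) 0 (fun t => t + (xs.count k : Int)))
        (PySem.Dict.empty : PySem.Dict String Int)
      = PySem.Dict.counter (List.map pvClassify xs) := by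
  apply PySem.Dict.ext
  have hkeysL :
      ((PySem.Set.ofList xs).foldl
        (fun r k => r.modify (pvClassify k) 0 (fun t => t + (xs.count k : Int)))
        (PySem.Dict.empty : PySem.Dict String Int)).keys
      = PySem.Set.ofList (List.map pvClassify xs) := by
    have h := PySem.Dict.keys_foldl_modify_key (PySem.Set.ofList xs) pvClassify 0
      (fun _ k => fun t => t + (xs.count k : Int)) (PySem.Dict.empty : PySem.Dict String Int)
    simp only [PySem.Dict.keys_empty, PySem.Set.update_nil_left] at h
    rw [h, pvOfList_map_ofList]
  have hndL :
      ((PySem.Set.ofList xs).foldl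
        (fun r k => r.modify (pvClassify k) 0 (fun t => t + (xs.count k : Int)))
        (PySem.Dict.empty : PySem.Dict String Int)).keys.Nodup := by
    exact PySem.Dict.nodup_keys_foldl_modify_key (PySem.Set.ofList xs) pvClassify 0
      (fun _ k => fun t => t + (xs.count k : Int)) _ (by simp [PySem.Dict.keys_empty])
  rw [PySem.Dict.items_eq_map_keys _ hndL 0,
      PySem.Dict.items_eq_map_keys _ (PySem.Dict.nodup_keys_counter _) 0,
      hkeysL, PySem.Dict.keys_counter]
  apply List.map_congr_left
  intro v _
  rw [pvGetD_foldl_modify_keyed, PySem.Dict.getD_empty, PySem.Dict.getD_counter,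
      pvSum_counts (PySem.Set.ofList xs) (PySem.Set.nodup_ofList xs) pvClassify v xs
        (fun x hx => (PySem.Set.mem_ofList xs x).mpr hx)]
  ring_nf

-- ===== VERDICT (by name: the statement is the Claim_ definition above) =====
theorem count_rule_classes_spec : Claim_equal_count_rule_classes := by
  intro all_labels _
  unfold Spec_count_rule_classes count_rule_classes count_rule_classes_alt
  rw [← List.foldl_flatten]
  have hstep : (fun (c : PySem.Dict String Int) (lab : String) =>
      if PySem.Str.startswith lab "bigram" then c.modify "bigram" 0 (· + 1)
      else if PySem.Str.startswith lab "trigram" then c.modify "trigram" 0 (· + 1)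
      else if PySem.Str.startswith lab "skip" then c.modify "skip_bigram" 0 (· + 1)
      else if PySem.Str.startswith lab "induction" then c.modify "induction" 0 (· + 1)
      else if PySem.Str.startswith lab "bracket" then c.modify "bracket" 0 (· + 1)
      else if lab == "setup" then c.modify "setup" 0 (· + 1)
      else if lab == "noise" || lab == "noise_seed" then c.modify "noise" 0 (· + 1)
      else c.modify "other" 0 (· + 1))
      = fun c lab => c.modify (pvClassify lab) 0 (· + 1) := by
    funext c lab; exact pvStepA_eq c lab
  rw [hstep]
  show (List.foldl (fun c lab => c.modify (pvClassify lab) 0 fun t => t + 1)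
          PySem.Dict.empty all_labels.flatten).items
      = (List.foldl (fun r p => r.modify (pvClassify p.1) 0 fun t => t + p.2)
          PySem.Dict.empty (PySem.Dict.counter all_labels.flatten).items).items
  apply congrArg PySem.Dict.items
  calc List.foldl (fun c lab => c.modify (pvClassify lab) 0 fun t => t + 1)
          PySem.Dict.empty all_labels.flatten
      = PySem.Dict.counter (List.map pvClassify all_labels.flatten) := by
        rw [PySem.Dict.counter_eq_foldl, List.foldl_map]
    _ = (PySem.Set.ofList all_labels.flatten).foldl
          (fun r k => r.modify (pvClassify k) 0 (fun t => t + (all_labels.flatten.count k : Int)))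
          PySem.Dict.empty := (pvAgg_eq_counter all_labels.flatten).symm
    _ = List.foldl (fun r p => r.modify (pvClassify p.1) 0 fun t => t + p.2)
          PySem.Dict.empty (PySem.Dict.counter all_labels.flatten).items := by
        rw [PySem.Dict.items_counter, List.foldl_map]
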